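-- pv_equiv track=rewrite | github.com/autch/piece-toolchain-llvm | tools/asm33conv/asm33conv.py | expand_xshift
-- ===== SOURCE A (Python) =====
-- def expand_xshift(llvm_mnem, rd, amount, comment):
--     """
--     xsrl %rd, N → 複数の srl %rd, step  (step ≤ 8 ずつ)
--     xsra %rd, N → 複数の sra %rd, step
--     xsla %rd, N → 複数の sll %rd, step  (sla = sll for integers)
--
--     S1C33 シフト命令は ext を使えない（CPU マニュアル明記）。
--     1命令あたりの最大シフト量は 8。
--     N = 0 の場合は命令を出力しない（シフト不要）。
--     """
--     if amount == 0:
--         return []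
--     lines = []
--     remaining = amount
--     while remaining > 0:
--         step = min(remaining, 8)
--         lines.append(f"\t{llvm_mnem}\t{rd}, {step}")
--         remaining -= step
--     # 末尾行にのみコメントを付ける
--     lines[-1] += comment
--     return lines
-- ===== SOURCE B (Python) =====
-- def expand_xshift(llvm_mnem, rd, amount, comment):
--     if amount == 0:
--         return []
--     lines = []
--     if amount > 0:
--         full, rem = divmod(amount, 8)
--         lines = [f"\t{llvm_mnem}\t{rd}, 8"] * full
--         if rem:
--             lines.append(f"\t{llvm_mnem}\t{rd}, {rem}")
--     lines[-1] += comment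
--     return lines
-- ===== Notes on version B (the rewrite author's own statement) =====
-- stated objective: simpler
-- what changed: Replaces the subtract-by-step while-loop with a closed-form divmod(amount, 8) breakdown: `full` copies of the 8-shift line built by list multiplication plus one remainder line, no running accumulator.
import Mathlib
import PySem

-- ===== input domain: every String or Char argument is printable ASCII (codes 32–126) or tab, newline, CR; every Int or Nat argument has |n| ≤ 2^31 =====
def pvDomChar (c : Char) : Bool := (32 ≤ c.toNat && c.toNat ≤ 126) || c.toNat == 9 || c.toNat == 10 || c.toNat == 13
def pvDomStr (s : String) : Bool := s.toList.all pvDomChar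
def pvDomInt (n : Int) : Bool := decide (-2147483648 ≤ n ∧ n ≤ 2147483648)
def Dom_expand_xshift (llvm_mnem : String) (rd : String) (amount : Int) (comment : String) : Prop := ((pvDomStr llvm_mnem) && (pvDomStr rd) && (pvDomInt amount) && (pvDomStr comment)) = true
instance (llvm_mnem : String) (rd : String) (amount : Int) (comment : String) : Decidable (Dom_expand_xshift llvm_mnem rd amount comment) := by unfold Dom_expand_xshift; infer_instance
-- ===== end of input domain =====

-- B replaces A's subtract-8-at-a-time while-loop by a closed-form divmod(amount, 8) breakdown (simpler);
-- both raise IndexError on negative amount (outside Pre_).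

-- ===== PORT A =====
-- f"\t{llvm_mnem}\t{rd}, {step}"
def xshiftLineA (m rd : String) (step : Int) : String :=
  "\t" ++ m ++ "\t" ++ rd ++ ", " ++ PySem.Int.toStr step

-- while remaining > 0: step = min(remaining, 8); lines.append(...); remaining -= step
def xshiftLoopA (m rd : String) (remaining : Int) (acc : List String) : List String :=
  if _h : remaining > 0 then
    xshiftLoopA m rd (remaining - min remaining 8) (acc ++ [xshiftLineA m rd (min remaining 8)])
  else acc
termination_by remaining.toNat
decreasing_by omega

def expand_xshift (llvm_mnem : String) (rd : String) (amount : Int) (comment : String) : List String :=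
  if amount = 0 then []
  else
    let lines := xshiftLoopA llvm_mnem rd amount []
    -- lines[-1] += comment  (Python raises IndexError when lines = [], i.e. amount < 0; outside Pre_)
    match lines.getLast? with
    | none => []
    | some last => lines.dropLast ++ [last ++ comment]

-- ===== PORT B =====
def expand_xshift_alt (llvm_mnem : String) (rd : String) (amount : Int) (comment : String) : List String :=
  if amount = 0 then []
  else
    let lines : List String :=
      if amount > 0 then
        let full := PySem.Int.floordiv amount 8
        let rem := PySem.Int.mod amount 8
        let lines0 := List.replicate full.toNat ("\t" ++ llvm_mnem ++ "\t" ++ rd ++ ", " ++ PySem.Int.toStr 8)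
        if rem ≠ 0 then lines0 ++ ["\t" ++ llvm_mnem ++ "\t" ++ rd ++ ", " ++ PySem.Int.toStr rem] else lines0
      else []
    -- lines[-1] += comment  (empty when amount < 0: B raises IndexError there too; outside Pre_)
    match lines.getLast? with
    | none => []
    | some last => lines.dropLast ++ [last ++ comment]

-- ===== PRECONDITION & SPEC =====
-- Pre_ excludes amount < 0, on which both Pythons raise IndexError (lines[-1] of an empty list).
def Pre_expand_xshift (llvm_mnem : String) (rd : String) (amount : Int) (comment : String) : Prop := 0 ≤ amount
instance (llvm_mnem : String) (rd : String) (amount : Int) (comment : String) : Decidable (Pre_expand_xshift llvm_mnem rd amount comment) := by unfold Pre_expand_xshift; infer_instance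
def pvWitness_expand_xshift : String × String × Int × String := ("srl", "%r1", 11, " ; c")

def Spec_expand_xshift (llvm_mnem : String) (rd : String) (amount : Int) (comment : String) (out : List String) : Prop := out = expand_xshift_alt llvm_mnem rd amount comment
instance (llvm_mnem : String) (rd : String) (amount : Int) (comment : String) (out : List String) : Decidable (Spec_expand_xshift llvm_mnem rd amount comment out) := by unfold Spec_expand_xshift; infer_instance

-- ===== CLAIM (what is proved, stated in full; the proofs are below) =====
def Claim_equal_expand_xshift : Prop := ∀ (llvm_mnem : String) (rd : String) (amount : Int) (comment : String), Dom_expand_xshift llvm_mnem rd amount comment → Pre_expand_xshift llvm_mnem rd amount comment → Spec_expand_xshift llvm_mnem rd amount comment (expand_xshift llvm_mnem rd amount comment)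

-- ===== LEMMAS AND PROOFS =====

-- B's block of lines (without the comment), as a function of the amount.
def xshiftBlk (m rd : String) (a : Int) : List String :=
  if PySem.Int.mod a 8 ≠ 0 then
    List.replicate (PySem.Int.floordiv a 8).toNat ("\t" ++ m ++ "\t" ++ rd ++ ", " ++ PySem.Int.toStr 8) ++
      ["\t" ++ m ++ "\t" ++ rd ++ ", " ++ PySem.Int.toStr (PySem.Int.mod a 8)]
  else List.replicate (PySem.Int.floordiv a 8).toNat ("\t" ++ m ++ "\t" ++ rd ++ ", " ++ PySem.Int.toStr 8)

theorem xshiftLoopA_eq (m rd : String) :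
    ∀ (n : Nat) (a : Int), a.toNat ≤ n → 0 < a →
      ∀ acc, xshiftLoopA m rd a acc = acc ++ xshiftBlk m rd a := by
  intro n
  induction n with
  | zero => intro a hn ha; omega
  | succ n ih =>
    intro a hn ha acc
    rw [xshiftLoopA]
    simp only [ha, dite_true]
    have h8 : PySem.Int.floordiv a 8 = a / 8 := PySem.Int.floordiv_eq_ediv_of_pos (by omega)
    have hm : PySem.Int.mod a 8 = a % 8 := PySem.Int.mod_eq_emod_of_pos (by omega)
    by_cases hle : a ≤ 8
    · -- step = a, the loop ends on the next iteration
      have hmin : min a 8 = a := by omega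
      rw [hmin]
      have hz : a - a = (0 : Int) := by omega
      rw [hz, xshiftLoopA]
      simp only [show ¬ (0:Int) > 0 by omega, dite_false]
      unfold xshiftBlk
      rw [h8, hm]
      by_cases h8' : a = 8
      · subst h8'; norm_num; rfl
      · have hd : a / 8 = 0 := by omega
        have hmod : a % 8 = a := by omega
        rw [hd, hmod]
        simp [show a ≠ 0 by omega, xshiftLineA]
    · -- step = 8, recurse
      have hmin : min a 8 = (8 : Int) := by omega
      rw [hmin]
      rw [ih (a - 8) (by omega) (by omega)]
      unfold xshiftBlk
      have h8' : PySem.Int.floordiv (a - 8) 8 = (a - 8) / 8 := PySem.Int.floordiv_eq_ediv_of_pos (by omega)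
      have hm' : PySem.Int.mod (a - 8) 8 = (a - 8) % 8 := PySem.Int.mod_eq_emod_of_pos (by omega)
      rw [h8, hm, h8', hm']
      have hq : (a / 8).toNat = ((a - 8) / 8).toNat + 1 := by omega
      have hr : a % 8 = (a - 8) % 8 := by omega
      rw [hq, hr, List.replicate_succ]
      split_ifs with hrz <;> simp [xshiftLineA, List.append_assoc]

-- ===== VERDICT (by name: the statement is the Claim_ definition above) =====
theorem expand_xshift_spec : Claim_equal_expand_xshift := by
  intro m rd amount comment _hdom hpre
  unfold Spec_expand_xshift expand_xshift expand_xshift_alt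
  by_cases h0 : amount = 0
  · simp [h0]
  · have hpos : 0 < amount := by
      have := hpre; unfold Pre_expand_xshift at this; omega
    simp only [h0, ite_false, hpos, if_pos]
    rw [xshiftLoopA_eq m rd amount.toNat amount le_rfl hpos []]
    simp only [List.nil_append]
    rfl
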